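-- pv_equiv track=rewrite | github.com/TENTA9/ThinkPRM_laptop | add_conf_sglang.py | get_prefix_before_step
-- ===== SOURCE A (Python) =====
-- def is_verification_chunk(chunk):
--     """검증 청크인지 확인 (Step k:로 시작하고 \\boxed{}로 끝나는지)"""
--     chunk = chunk.strip()
--     if not chunk.startswith("Step"):
--         return False
--     if "\\boxed{" not in chunk:
--         return False
--     return True
--
-- def get_prefix_before_step(cot_chunks, step_index):
--     """
--     step_index번째 검증 청크 직전까지의 검증 청크들만 연결
--     단, 맨 앞의 "<think>\n"은 포함하되, 첫 검증 청크 이전의 다른 텍스트는 제외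
--
--     Args:
--         cot_chunks: 전체 cot_chunks 리스트
--         step_index: 검증하려는 스텝의 인덱스 (0-based)
--
--     Returns:
--         "<think>\n" + 검증 청크들만 연결한 문자열
--     """
--     prefix_chunks = []
--     verification_count = 0
--     first_verification_found = False
--
--     for chunk in cot_chunks:
--         if is_verification_chunk(chunk):
--             # 첫 번째 검증 청크를 발견한 순간부터 수집 시작
--             first_verification_found = True
--
--             if verification_count == step_index:
--                 # 목표 검증 청크에 도달하면 중단
--                 break
--             verification_count += 1
--             prefix_chunks.append(chunk)
--         elif first_verification_found:
--             # 첫 검증 청크 발견 이후의 텍스트만 수집 (청크 사이의 "\n\n" 등)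
--             prefix_chunks.append(chunk)
--
--     # 맨 앞에 "<think>\n" 추가
--     return "<think>\n" + ''.join(prefix_chunks)
-- ===== SOURCE B (Python) =====
-- def is_verification_chunk(chunk):
--     chunk = chunk.strip()
--     if not chunk.startswith("Step"):
--         return False
--     if "\\boxed{" not in chunk:
--         return False
--     return True
--
-- def get_prefix_before_step(cot_chunks, step_index):
--     verif_idx = [i for i, c in enumerate(cot_chunks) if is_verification_chunk(c)]
--     if not verif_idx:
--         return "<think>\n"
--     start = verif_idx[0]
--     if 0 <= step_index < len(verif_idx):
--         end = verif_idx[step_index]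
--     else:
--         end = len(cot_chunks)
--     return "<think>\n" + ''.join(cot_chunks[start:end])
-- ===== Notes on version B (the rewrite author's own statement) =====
-- stated objective: alternative
-- what changed: Replaces A's single stateful accumulating loop (collect-and-break with verification_count and first_verification_found flags) by computing the list of verification-chunk indices once and returning a single slice of cot_chunks from the first verification index to the step_index-th one (or to the end when step_index is out of range).
import Mathlib
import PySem

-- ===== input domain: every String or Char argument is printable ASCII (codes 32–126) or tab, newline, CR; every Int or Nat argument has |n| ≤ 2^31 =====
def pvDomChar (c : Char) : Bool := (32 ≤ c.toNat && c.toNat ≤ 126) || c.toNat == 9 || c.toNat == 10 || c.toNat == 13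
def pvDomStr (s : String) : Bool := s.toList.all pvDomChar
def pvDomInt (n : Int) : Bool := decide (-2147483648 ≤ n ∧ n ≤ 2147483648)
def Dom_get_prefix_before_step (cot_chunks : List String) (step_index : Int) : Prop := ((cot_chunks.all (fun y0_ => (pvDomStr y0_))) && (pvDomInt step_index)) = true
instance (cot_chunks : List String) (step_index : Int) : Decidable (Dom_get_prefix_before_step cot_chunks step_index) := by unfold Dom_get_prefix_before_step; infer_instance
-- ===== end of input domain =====

-- B builds the list of verification-chunk indices once and returns one slice of cot_chunks,
-- replacing A's stateful accumulating loop (objective: alternative decomposition, same cost).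

-- ===== PORT A =====
-- is_verification_chunk, shared module helper
def pvIsVerif (chunk : String) : Bool :=
  let c := PySem.Str.strip chunk
  if ¬ (PySem.Str.startswith c "Step") then false
  else if ¬ (PySem.Str.isIn "\\boxed{" c) then false
  else true

-- the for-loop of A with its state (prefix_chunks, verification_count, first_verification_found);
-- returning acc models the `break`
def pvLoopA (step_index : Int) : List String → List String → Int → Bool → List String
  | [], acc, _, _ => acc
  | chunk :: rest, acc, cnt, ff =>
    if pvIsVerif chunk then
      if cnt = step_index then acc
      else pvLoopA step_index rest (acc ++ [chunk]) (cnt + 1) true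
    else if ff then pvLoopA step_index rest (acc ++ [chunk]) cnt ff
    else pvLoopA step_index rest acc cnt ff

def get_prefix_before_step (cot_chunks : List String) (step_index : Int) : String :=
  "<think>\n" ++ PySem.Str.join "" (pvLoopA step_index cot_chunks [] 0 false)

-- ===== PORT B =====
def get_prefix_before_step_alt (cot_chunks : List String) (step_index : Int) : String :=
  let verif_idx : List Int :=
    ((PySem.List.enumerate cot_chunks).filter (fun p => pvIsVerif p.2)).map Prod.fst
  match verif_idx with
  | [] => "<think>\n"
  | v0 :: _ =>
    let endI : Int :=
      if 0 ≤ step_index ∧ step_index < (verif_idx.length : Int)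
      then PySem.List.pyGetD verif_idx step_index 0
      else (cot_chunks.length : Int)
    "<think>\n" ++ PySem.Str.join "" (PySem.List.slice cot_chunks (some v0) (some endI))

-- ===== PRECONDITION & SPEC =====
def Spec_get_prefix_before_step (cot_chunks : List String) (step_index : Int) (out : String) : Prop := out = get_prefix_before_step_alt cot_chunks step_index
instance (cot_chunks : List String) (step_index : Int) (out : String) : Decidable (Spec_get_prefix_before_step cot_chunks step_index out) := by unfold Spec_get_prefix_before_step; infer_instance

-- ===== CLAIM (what is proved, stated in full; the proofs are below) =====
def Claim_equal_get_prefix_before_step : Prop := ∀ (cot_chunks : List String) (step_index : Int), Dom_get_prefix_before_step cot_chunks step_index → Spec_get_prefix_before_step cot_chunks step_index (get_prefix_before_step cot_chunks step_index)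

-- ===== LEMMAS AND PROOFS =====

-- indices (starting at offset k) of verification chunks: B's verif_idx generalised by the offset
def pvE (xs : List String) (k : Int) : List Int :=
  ((PySem.List.enumerate xs k).filter (fun p => pvIsVerif p.2)).map Prod.fst

lemma pvE_cons (c : String) (rest : List String) (k : Int) :
    pvE (c :: rest) k = if pvIsVerif c then k :: pvE rest (k + 1) else pvE rest (k + 1) := by
  simp [pvE, PySem.List.enumerate_cons, List.filter_cons]
  split <;> simp_all

lemma pvE_mem_bounds : ∀ (xs : List String) (k v : Int), v ∈ pvE xs k → k ≤ v ∧ v < k + xs.length := by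
  intro xs
  induction xs with
  | nil => intro k v h; simp [pvE] at h
  | cons c rest ih =>
    intro k v h
    rw [pvE_cons] at h
    split at h
    · rcases List.mem_cons.1 h with h | h
      · subst h; constructor <;> simp
      · have := ih (k + 1) v h; simp at *; omega
    · have := ih (k + 1) v h; simp at *; omega

lemma pvLoopA_acc (si : Int) : ∀ (xs acc : List String) (cnt : Int) (ff : Bool),
    pvLoopA si xs acc cnt ff = acc ++ pvLoopA si xs [] cnt ff := by
  intro xs
  induction xs with
  | nil => intro acc cnt ff; simp [pvLoopA]
  | cons c rest ih =>
    intro acc cnt ff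
    by_cases hv : pvIsVerif c
    · by_cases hc : cnt = si
      · simp [pvLoopA, hv, hc]
      · simp only [pvLoopA, hv, if_true, hc, if_false]
        rw [ih (acc ++ [c]), ih ([] ++ [c])]
        simp
    · cases ff
      · simp only [pvLoopA, hv]
        exact ih acc cnt false
      · simp only [pvLoopA, hv, Bool.false_eq_true, if_false, if_true]
        rw [ih (acc ++ [c]), ih ([] ++ [c])]
        simp

-- the loop after the first verification chunk has been found (ff = true)
lemma pvTakeShift {α : Type} (c : α) (rest : List α) (v k : Int) (h : k + 1 ≤ v) :
    List.take (v - k).toNat (c :: rest) = c :: List.take (v - (k + 1)).toNat rest := by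
  have hn : (v - k).toNat = (v - (k + 1)).toNat + 1 := by omega
  rw [hn, List.take_succ_cons]

lemma pvGetD_mem (l : List Int) (i : Int) (h0 : 0 ≤ i) (h1 : i < (l.length : Int)) :
    PySem.List.pyGetD l i 0 ∈ l := by
  rw [PySem.List.pyGetD_eq_getElem _ _ h0 h1]
  exact List.getElem_mem _

lemma pvGetD_cons_shift (a : Int) (l : List Int) (i : Int) (h : 1 ≤ i) (h2 : i < (l.length : Int) + 1) :
    PySem.List.pyGetD (a :: l) i 0 = PySem.List.pyGetD l (i - 1) 0 := by
  rw [PySem.List.pyGetD_eq_getElem (a :: l) 0 (by omega) (by simp; omega),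
      PySem.List.pyGetD_eq_getElem l 0 (by omega) (by omega)]
  have hn : i.toNat = (i - 1).toNat + 1 := by omega
  simp only [hn, List.getElem_cons_succ]

lemma pvLoopA_true (si : Int) : ∀ (ys : List String) (k cnt : Int),
    pvLoopA si ys [] cnt true =
      if 0 ≤ si - cnt ∧ si - cnt < ((pvE ys k).length : Int)
      then List.take (PySem.List.pyGetD (pvE ys k) (si - cnt) 0 - k).toNat ys
      else ys := by
  intro ys
  induction ys with
  | nil =>
    intro k cnt
    have h0 : pvE ([] : List String) k = [] := by simp [pvE, PySem.List.enumerate]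
    rw [h0, if_neg (by simp)]
    simp [pvLoopA]
  | cons c rest ih =>
    intro k cnt
    rw [pvE_cons]
    by_cases hv : pvIsVerif c
    · rw [if_pos hv]
      by_cases hc : cnt = si
      · have hcond : 0 ≤ si - cnt ∧ si - cnt < (((k :: pvE rest (k + 1)).length : Nat) : Int) := by
          simp; omega
        rw [if_pos hcond]
        have : si - cnt = 0 := by omega
        rw [this]
        simp [pvLoopA, hv, hc, PySem.List.pyGetD_of_nonneg]
      · have hL : pvLoopA si (c :: rest) [] cnt true = c :: pvLoopA si rest [] (cnt + 1) true := by
          simp only [pvLoopA, hv, if_true, hc, if_false]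
          rw [pvLoopA_acc]
          simp
        rw [hL, ih (k + 1) (cnt + 1)]
        by_cases hcond : 0 ≤ si - (cnt + 1) ∧ si - (cnt + 1) < ((pvE rest (k + 1)).length : Int)
        · rw [if_pos hcond]
          have hcond2 : 0 ≤ si - cnt ∧ si - cnt < (((k :: pvE rest (k + 1)).length : Nat) : Int) := by
            simp; omega
          rw [if_pos hcond2]
          rw [pvGetD_cons_shift k _ (si - cnt) (by omega) (by simp at hcond2 ⊢; omega)]
          have hsub : si - cnt - 1 = si - (cnt + 1) := by omega
          rw [hsub]
          have hmem := pvGetD_mem (pvE rest (k + 1)) (si - (cnt + 1)) hcond.1 hcond.2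
          have hb := pvE_mem_bounds rest (k + 1) _ hmem
          exact (pvTakeShift c rest _ k (by omega)).symm
        · rw [if_neg hcond]
          have hcond2 : ¬ (0 ≤ si - cnt ∧ si - cnt < (((k :: pvE rest (k + 1)).length : Nat) : Int)) := by
            simp; intro h1; simp at hcond; omega
          rw [if_neg hcond2]
    · rw [if_neg hv]
      have hL : pvLoopA si (c :: rest) [] cnt true = c :: pvLoopA si rest [] cnt true := by
        simp only [pvLoopA, hv, Bool.false_eq_true, if_false, if_true]
        rw [pvLoopA_acc]
        simp
      rw [hL, ih (k + 1) cnt]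
      by_cases hcond : 0 ≤ si - cnt ∧ si - cnt < ((pvE rest (k + 1)).length : Int)
      · rw [if_pos hcond, if_pos hcond]
        have hmem := pvGetD_mem (pvE rest (k + 1)) (si - cnt) hcond.1 hcond.2
        have hb := pvE_mem_bounds rest (k + 1) _ hmem
        exact (pvTakeShift c rest _ k (by omega)).symm
      · rw [if_neg hcond, if_neg hcond]

lemma pvMain_nil (si : Int) : ∀ (xs : List String) (k : Int),
    pvE xs k = [] → pvLoopA si xs [] 0 false = [] := by
  intro xs
  induction xs with
  | nil => intro k _; simp [pvLoopA]
  | cons c rest ih =>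
    intro k hE
    rw [pvE_cons] at hE
    by_cases hv : pvIsVerif c
    · rw [if_pos hv] at hE; exact absurd hE (by simp)
    · rw [if_neg hv] at hE
      simp only [pvLoopA, hv, Bool.false_eq_true, if_false]
      exact ih (k + 1) hE

set_option maxHeartbeats 1000000 in
lemma pvMain_cons (si : Int) : ∀ (xs : List String) (k v0 : Int) (tl : List Int),
    pvE xs k = v0 :: tl →
    pvLoopA si xs [] 0 false =
      List.take (((if 0 ≤ si ∧ si < ((pvE xs k).length : Int)
                    then PySem.List.pyGetD (pvE xs k) si 0
                    else k + (xs.length : Int)) - k).toNat - (v0 - k).toNat)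
        (List.drop (v0 - k).toNat xs) := by
  intro xs
  induction xs with
  | nil => intro k v0 tl hE; simp [pvE, PySem.List.enumerate] at hE
  | cons c rest ih =>
    intro k v0 tl hE
    rw [pvE_cons] at hE ⊢
    by_cases hv : pvIsVerif c
    · rw [if_pos hv] at hE ⊢
      injection hE with hv0 htl
      subst hv0
      simp only [Int.sub_self, Int.toNat_zero, List.drop_zero, Nat.sub_zero]
      by_cases hc : (0 : Int) = si
      · have hcond : 0 ≤ si ∧ si < (((k :: pvE rest (k + 1)).length : Nat) : Int) := by simp; omega
        rw [if_pos hcond, ← hc]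
        simp [pvLoopA, hv, PySem.List.pyGetD_of_nonneg]
      · have hL : pvLoopA si (c :: rest) [] 0 false = c :: pvLoopA si rest [] 1 true := by
          simp only [pvLoopA, hv, if_true, hc, if_false]
          rw [pvLoopA_acc]
          simp
        rw [hL, pvLoopA_true si rest (k + 1) 1]
        by_cases hcond : 0 ≤ si - 1 ∧ si - 1 < ((pvE rest (k + 1)).length : Int)
        · rw [if_pos hcond]
          have hcond2 : 0 ≤ si ∧ si < (((k :: pvE rest (k + 1)).length : Nat) : Int) := by
            simp; omega
          rw [if_pos hcond2]
          rw [pvGetD_cons_shift k _ si (by omega) (by simp at hcond2 ⊢; omega)]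
          have hmem := pvGetD_mem (pvE rest (k + 1)) (si - 1) hcond.1 hcond.2
          have hb := pvE_mem_bounds rest (k + 1) _ hmem
          exact (pvTakeShift c rest _ k (by omega)).symm
        · rw [if_neg hcond]
          have hcond2 : ¬ (0 ≤ si ∧ si < (((k :: pvE rest (k + 1)).length : Nat) : Int)) := by
            simp; intro h1; simp at hcond; omega
          rw [if_neg hcond2]
          have hn : (k + ((c :: rest).length : Int) - k).toNat = (c :: rest).length := by omega
          rw [hn, List.take_length]
    · rw [if_neg hv] at hE ⊢
      have hL : pvLoopA si (c :: rest) [] 0 false = pvLoopA si rest [] 0 false := by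
        simp only [pvLoopA, hv, Bool.false_eq_true, if_false]
      rw [hL, ih (k + 1) v0 tl hE, hE]
      have hmem : v0 ∈ pvE rest (k + 1) := by rw [hE]; exact List.mem_cons_self ..
      have hb := pvE_mem_bounds rest (k + 1) _ hmem
      have hdrop : List.drop (v0 - k).toNat (c :: rest) = List.drop (v0 - (k + 1)).toNat rest := by
        have hn : (v0 - k).toNat = (v0 - (k + 1)).toNat + 1 := by omega
        rw [hn, List.drop_succ_cons]
      rw [hdrop]
      congr 1
      by_cases hcond : 0 ≤ si ∧ si < ((v0 :: tl).length : Int)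
      · rw [if_pos hcond, if_pos hcond]
        have hmem2 := pvGetD_mem (v0 :: tl) si hcond.1 hcond.2
        have hb2 := pvE_mem_bounds rest (k + 1) _ (by rw [hE]; exact hmem2)
        omega
      · rw [if_neg hcond, if_neg hcond]
        simp only [List.length_cons]
        push_cast
        omega

lemma pvAlt_eq (xs : List String) (si : Int) :
    get_prefix_before_step_alt xs si =
      match pvE xs 0 with
      | [] => "<think>\n"
      | v0 :: _ =>
        "<think>\n" ++ PySem.Str.join ""
          (PySem.List.slice xs (some v0)
            (some (if 0 ≤ si ∧ si < ((pvE xs 0).length : Int)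
                   then PySem.List.pyGetD (pvE xs 0) si 0
                   else (xs.length : Int)))) := rfl

-- ===== VERDICT (by name: the statement is the Claim_ definition above) =====
lemma pvAlt_nil (xs : List String) (si : Int) (h : pvE xs 0 = []) :
    get_prefix_before_step_alt xs si = "<think>\n" := by
  rw [pvAlt_eq xs si, h]

lemma pvAlt_cons (xs : List String) (si : Int) (v0 : Int) (tl : List Int) (h : pvE xs 0 = v0 :: tl) :
    get_prefix_before_step_alt xs si =
      "<think>\n" ++ PySem.Str.join ""
        (PySem.List.slice xs (some v0)
          (some (if 0 ≤ si ∧ si < (((v0 :: tl).length : Nat) : Int)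
                 then PySem.List.pyGetD (v0 :: tl) si 0
                 else (xs.length : Int)))) := by
  rw [pvAlt_eq xs si, h]

theorem get_prefix_before_step_spec : Claim_equal_get_prefix_before_step := by
  unfold Claim_equal_get_prefix_before_step
  intro xs si _
  unfold Spec_get_prefix_before_step
  cases hE : pvE xs 0 with
  | nil =>
    rw [pvAlt_nil xs si hE, get_prefix_before_step, pvMain_nil si xs 0 hE]
    rfl
  | cons v0 tl =>
    rw [pvAlt_cons xs si v0 tl hE, get_prefix_before_step, pvMain_cons si xs 0 v0 tl hE, hE]
    have hall : ∀ v ∈ v0 :: tl, 0 ≤ v ∧ v < (xs.length : Int) := by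
      intro v hv
      have := pvE_mem_bounds xs 0 v (by rw [hE]; exact hv)
      omega
    have hb := hall v0 (List.mem_cons_self ..)
    by_cases hcond : 0 ≤ si ∧ si < ((v0 :: tl).length : Int)
    · rw [if_pos hcond, if_pos hcond]
      have hv := hall _ (pvGetD_mem _ _ hcond.1 hcond.2)
      rw [PySem.List.slice_toNat xs (by omega) (by omega)]
      have h2 : (v0 - 0).toNat = v0.toNat := by omega
      have h1 : (PySem.List.pyGetD (v0 :: tl) si 0 - 0).toNat = (PySem.List.pyGetD (v0 :: tl) si 0).toNat := by
        omega
      rw [h1, h2]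
    · rw [if_neg hcond, if_neg hcond]
      rw [PySem.List.slice_toNat xs (by omega) (by omega)]
      have h2 : (v0 - 0).toNat = v0.toNat := by omega
      have h1 : ((0 : Int) + (xs.length : Int) - 0).toNat = ((xs.length : Int)).toNat := by omega
      rw [h1, h2]
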